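-- pv_equiv track=rewrite | github.com/thierryxdp/TCC | problems/812/solution_266138.py | retira_pontuacao
-- ===== SOURCE A (Python) =====
-- def retira_pontuacao(texto):
--   	'''substitui a pontuacao por espacos em branco
--     str -> str'''
--   	pontuacoes = ['-',',','.',';',':','?','!']
--   	list_frase = list(texto)
--
--   	for pontuacao in pontuacoes:
-- 	    for pos,char in enumerate(texto):
--     	 	 if char == pontuacao:
--         		list_frase[pos] = ' '
--   	frase = ''.join(list_frase)
--   	return frase
-- ===== SOURCE B (Python) =====
-- def retira_pontuacao(texto):
--     pontuacoes = {'-', ',', '.', ';', ':', '?', '!'}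
--     return ''.join(' ' if c in pontuacoes else c for c in texto)
-- ===== Notes on version B (the rewrite author's own statement) =====
-- stated objective: faster
-- what changed: Single pass over the string with a punctuation membership test replaces A's outer loop over 7 punctuation marks each rescanning the whole string and mutating a char list by index.
import Mathlib
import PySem

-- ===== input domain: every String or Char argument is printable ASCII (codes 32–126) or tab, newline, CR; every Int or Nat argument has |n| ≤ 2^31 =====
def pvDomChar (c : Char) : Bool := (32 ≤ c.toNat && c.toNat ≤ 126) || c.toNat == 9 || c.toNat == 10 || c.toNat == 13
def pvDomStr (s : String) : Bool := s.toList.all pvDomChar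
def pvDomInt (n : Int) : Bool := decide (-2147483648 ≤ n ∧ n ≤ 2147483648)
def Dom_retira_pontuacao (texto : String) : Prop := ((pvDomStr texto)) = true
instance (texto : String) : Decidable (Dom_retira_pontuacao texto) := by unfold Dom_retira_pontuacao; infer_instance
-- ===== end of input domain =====

-- B replaces A's seven full rescans of the string (one per punctuation mark, mutating a char
-- list by index) with a single pass mapping punctuation characters to spaces.

-- ===== PORT A =====
-- inner loop of A: `for pos,char in enumerate(texto): if char == pontuacao: list_frase[pos] = ' '`
def pvInnerLoop (p : Char) : List Char → Nat → List Char → List Char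
  | [], _, l => l
  | c :: rest, pos, l => pvInnerLoop p rest (pos + 1) (if c = p then l.set pos ' ' else l)

def retira_pontuacao (texto : String) : String :=
  let pontuacoes : List Char := ['-', ',', '.', ';', ':', '?', '!']
  let list_frase := texto.toList
  let list_frase := pontuacoes.foldl (fun l p => pvInnerLoop p texto.toList 0 l) list_frase
  String.mk list_frase

-- ===== PORT B =====
def pvPontuacoes : PySem.Set Char := PySem.Set.ofList ['-', ',', '.', ';', ':', '?', '!']

def retira_pontuacao_alt (texto : String) : String :=
  String.mk (texto.toList.map (fun c => if c ∈ pvPontuacoes then ' ' else c))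

-- ===== PRECONDITION & SPEC =====
def Spec_retira_pontuacao (texto : String) (out : String) : Prop := out = retira_pontuacao_alt texto
instance (texto : String) (out : String) : Decidable (Spec_retira_pontuacao texto out) := by unfold Spec_retira_pontuacao; infer_instance

-- ===== CLAIM (what is proved, stated in full; the proofs are below) =====
def Claim_equal_retira_pontuacao : Prop := ∀ (texto : String), Dom_retira_pontuacao texto → Spec_retira_pontuacao texto (retira_pontuacao texto)

-- ===== LEMMAS AND PROOFS =====

-- One inner pass for mark p acts pointwise: past `pos` it is zipWith over the remaining text.
lemma pvInnerLoop_eq (p : Char) :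
    ∀ (rest : List Char) (pos : Nat) (l : List Char), l.length = pos + rest.length →
      pvInnerLoop p rest pos l =
        l.take pos ++ List.zipWith (fun c x => if c = p then ' ' else x) rest (l.drop pos) := by
  intro rest
  induction rest with
  | nil =>
    intro pos l h
    simp only [List.length_nil, Nat.add_zero] at h
    simp [pvInnerLoop, List.take_of_length_le (by omega : l.length ≤ pos)]
  | cons c rest ih =>
    intro pos l h
    have hpos : pos < l.length := by simp at h; omega
    have hdrop : l.drop pos = l[pos] :: l.drop (pos + 1) := List.drop_eq_getElem_cons hpos
    have htake : l.take (pos + 1) = l.take pos ++ [l[pos]] := by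
      rw [List.take_add_one, List.getElem?_eq_getElem hpos]; rfl
    by_cases hc : c = p
    · have hset : l.set pos ' ' = l.take pos ++ ' ' :: l.drop (pos+1) := by
        rw [List.set_eq_take_append_cons_drop, if_pos hpos]
      have hlen : (l.set pos ' ').length = (pos + 1) + rest.length := by simp at h ⊢; omega
      rw [show pvInnerLoop p (c :: rest) pos l = pvInnerLoop p rest (pos+1) (l.set pos ' ')
            from by simp [pvInnerLoop, hc]]
      rw [ih (pos+1) _ hlen, hdrop]
      simp only [List.zipWith, if_pos hc]
      have htakelen : (l.take pos).length = pos := by simp; omega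
      rw [hset, List.take_append, List.drop_append, htakelen,
          List.take_of_length_le (by omega : (l.take pos).length ≤ pos + 1)]
      simp [List.append_assoc, List.drop_of_length_le (show (l.take pos).length ≤ pos + 1 by simp)]
    · have hlen2 : l.length = (pos + 1) + rest.length := by simp at h; omega
      rw [show pvInnerLoop p (c :: rest) pos l = pvInnerLoop p rest (pos+1) l
            from by simp [pvInnerLoop, hc]]
      rw [ih (pos+1) l hlen2, hdrop]
      simp only [List.zipWith, if_neg hc]
      rw [htake, List.append_assoc]
      rfl

lemma pvInnerLoop_zero (p : Char) (t l : List Char) (h : l.length = t.length) :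
    pvInnerLoop p t 0 l = List.zipWith (fun c x => if c = p then ' ' else x) t l := by
  simpa using pvInnerLoop_eq p t 0 l (by omega)

lemma pvZipWith_id (t : List Char) : ∀ (l : List Char), l.length = t.length →
    List.zipWith (fun _ x => x) t l = l := by
  induction t with
  | nil => intro l h; simp at h; simp [h]
  | cons c t ih =>
    intro l h
    cases l with
    | nil => simp at h
    | cons x l => simp at h; simp [List.zipWith, ih l h]

lemma pvZipWith_step (p : Char) (ps : List Char) :
    ∀ (t l : List Char),
      List.zipWith (fun c x => if c ∈ ps then ' ' else x) t
        (List.zipWith (fun c x => if c = p then ' ' else x) t l) =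
      List.zipWith (fun c x => if c ∈ p :: ps then ' ' else x) t l := by
  intro t
  induction t with
  | nil => intro l; simp
  | cons c t ih =>
    intro l
    cases l with
    | nil => simp
    | cons x l =>
      simp only [List.zipWith, ih]
      by_cases h1 : c ∈ ps <;> by_cases h2 : c = p <;>
        simp [h1, h2, List.mem_cons]

lemma pvFold_eq (t : List Char) :
    ∀ (ps : List Char) (l : List Char), l.length = t.length →
      ps.foldl (fun l p => pvInnerLoop p t 0 l) l =
        List.zipWith (fun c x => if c ∈ ps then ' ' else x) t l := by
  intro ps
  induction ps with
  | nil =>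
    intro l h
    simpa using (pvZipWith_id t l h).symm
  | cons p ps ih =>
    intro l h
    have h1 : (pvInnerLoop p t 0 l).length = t.length := by
      rw [pvInnerLoop_zero p t l h]; simp [h]
    calc (p :: ps).foldl (fun l p => pvInnerLoop p t 0 l) l
        = ps.foldl (fun l p => pvInnerLoop p t 0 l) (pvInnerLoop p t 0 l) := by simp
      _ = List.zipWith (fun c x => if c ∈ ps then ' ' else x) t (pvInnerLoop p t 0 l) := ih _ h1
      _ = List.zipWith (fun c x => if c ∈ p :: ps then ' ' else x) t l := by
            rw [pvInnerLoop_zero p t l h, pvZipWith_step]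

lemma pvZipWith_self (f : Char → Char → Char) :
    ∀ (t : List Char), List.zipWith f t t = t.map (fun c => f c c) := by
  intro t
  induction t with
  | nil => rfl
  | cons c t ih => simp [List.zipWith]

-- ===== VERDICT (by name: the statement is the Claim_ definition above) =====
theorem retira_pontuacao_spec : Claim_equal_retira_pontuacao := by
  intro texto _
  unfold Spec_retira_pontuacao retira_pontuacao retira_pontuacao_alt
  simp only []
  rw [pvFold_eq texto.toList _ texto.toList rfl,
      pvZipWith_self (fun c x => if c ∈ (['-', ',', '.', ';', ':', '?', '!'] : List Char) then ' ' else x)]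
  rfl
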